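-- pv_equiv track=rewrite | github.com/JohnUrbani/SudokuSolver | main.py | get_grid_positions
-- ===== SOURCE A (Python) =====
-- def get_locations_in_grid(grid):
--     locations = []
--     if grid == 1:
--         locations.extend(list(range(0, 3)))
--         locations.extend(list(range(9, 12)))
--         locations.extend(list(range(18, 21)))
--         return locations
--     elif grid == 2:
--         locations.extend(list(range(3, 6)))
--         locations.extend(list(range(12, 15)))
--         locations.extend(list(range(21, 24)))
--         return locations
--     elif grid == 3:
--         locations.extend(list(range(6, 9)))
--         locations.extend(list(range(15, 18)))
--         locations.extend(list(range(24, 27)))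
--         return locations
--     elif grid == 4:
--         locations.extend(list(range(27, 30)))
--         locations.extend(list(range(36, 39)))
--         locations.extend(list(range(45, 48)))
--         return locations
--     elif grid == 5:
--         locations.extend(list(range(30, 33)))
--         locations.extend(list(range(39, 42)))
--         locations.extend(list(range(48, 51)))
--         return locations
--     elif grid == 6:
--         locations.extend(list(range(33, 36)))
--         locations.extend(list(range(42, 45)))
--         locations.extend(list(range(51, 54)))
--         return locations
--     elif grid == 7:
--         locations.extend(list(range(54, 57)))
--         locations.extend(list(range(63, 66)))
--         locations.extend(list(range(72, 75)))
--         return locations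
--     elif grid == 8:
--         locations.extend(list(range(57, 60)))
--         locations.extend(list(range(66, 69)))
--         locations.extend(list(range(75, 78)))
--         return locations
--     elif grid == 9:
--         locations.extend(list(range(60, 63)))
--         locations.extend(list(range(69, 72)))
--         locations.extend(list(range(78, 81)))
--         return locations
--     else:
--         return locations
--
-- def get_grid_positions(vals, i):
--     grid_positions = []
--     grid = 0
--     for j in range(3):
--         if 0+(3*j) <= i < 3+(3*j) or 9+(3*j) <= i < 12+(3*j) or 18+(3*j) <= i < 21+(3*j):
--             grid = j+1
--         elif 27 + (3 * j) <= i < 30 + (3 * j) or 36 + (3 * j) <= i < 39 + (3 * j) or 45 + (3 * j) <= i < 48 + (3 * j):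
--             grid = j + 4
--         elif 54 + (3 * j) <= i < 57 + (3 * j) or 63 + (3 * j) <= i < 66 + (3 * j) or 72 + (3 * j) <= i < 75 + (3 * j):
--             grid = j + 7
--
--     grid_positions.extend(get_locations_in_grid(grid))
--
--     return grid_positions
-- ===== SOURCE B (Python) =====
-- def get_grid_positions(vals, i):
--     if not (0 <= i < 81):
--         return []
--     base = (i // 9 // 3) * 27 + (i % 9 // 3) * 3
--     return [base + r * 9 + c for r in range(3) for c in range(3)]
-- ===== Notes on version B (the rewrite author's own statement) =====
-- stated objective: simpler
-- what changed: Replaces the interval-matching loop plus the 9-way hardcoded block table with a direct closed-form block-index computation (base = (i//9//3)*27 + (i%9//3)*3) and a comprehension.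
import Mathlib
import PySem

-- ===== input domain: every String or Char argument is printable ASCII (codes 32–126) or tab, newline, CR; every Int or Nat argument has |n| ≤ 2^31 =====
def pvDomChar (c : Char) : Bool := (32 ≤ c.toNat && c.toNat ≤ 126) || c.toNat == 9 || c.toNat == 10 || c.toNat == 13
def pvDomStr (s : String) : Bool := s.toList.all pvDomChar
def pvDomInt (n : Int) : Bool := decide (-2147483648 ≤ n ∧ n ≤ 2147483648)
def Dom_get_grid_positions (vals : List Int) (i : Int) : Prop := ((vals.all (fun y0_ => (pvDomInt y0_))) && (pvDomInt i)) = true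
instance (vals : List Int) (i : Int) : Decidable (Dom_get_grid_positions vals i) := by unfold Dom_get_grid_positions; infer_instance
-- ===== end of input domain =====

-- B replaces A's interval-matching loop and 9-way hardcoded block table with a
-- closed-form block-base computation; objective: simpler (same return value everywhere).

-- ===== PORT A =====
def get_locations_in_grid (grid : Int) : List Int :=
  let locations : List Int := []
  if grid = 1 then
    locations ++ PySem.List.pyRange 0 3 1 ++ PySem.List.pyRange 9 12 1 ++ PySem.List.pyRange 18 21 1
  else if grid = 2 then
    locations ++ PySem.List.pyRange 3 6 1 ++ PySem.List.pyRange 12 15 1 ++ PySem.List.pyRange 21 24 1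
  else if grid = 3 then
    locations ++ PySem.List.pyRange 6 9 1 ++ PySem.List.pyRange 15 18 1 ++ PySem.List.pyRange 24 27 1
  else if grid = 4 then
    locations ++ PySem.List.pyRange 27 30 1 ++ PySem.List.pyRange 36 39 1 ++ PySem.List.pyRange 45 48 1
  else if grid = 5 then
    locations ++ PySem.List.pyRange 30 33 1 ++ PySem.List.pyRange 39 42 1 ++ PySem.List.pyRange 48 51 1
  else if grid = 6 then
    locations ++ PySem.List.pyRange 33 36 1 ++ PySem.List.pyRange 42 45 1 ++ PySem.List.pyRange 51 54 1
  else if grid = 7 then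
    locations ++ PySem.List.pyRange 54 57 1 ++ PySem.List.pyRange 63 66 1 ++ PySem.List.pyRange 72 75 1
  else if grid = 8 then
    locations ++ PySem.List.pyRange 57 60 1 ++ PySem.List.pyRange 66 69 1 ++ PySem.List.pyRange 75 78 1
  else if grid = 9 then
    locations ++ PySem.List.pyRange 60 63 1 ++ PySem.List.pyRange 69 72 1 ++ PySem.List.pyRange 78 81 1
  else
    locations

def get_grid_positions (vals : List Int) (i : Int) : List Int :=
  let grid_positions : List Int := []
  let grid : Int :=
    (PySem.List.pyRange 0 3 1).foldl (fun grid j =>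
      if (0 + 3 * j ≤ i ∧ i < 3 + 3 * j) ∨ (9 + 3 * j ≤ i ∧ i < 12 + 3 * j) ∨
         (18 + 3 * j ≤ i ∧ i < 21 + 3 * j) then j + 1
      else if (27 + 3 * j ≤ i ∧ i < 30 + 3 * j) ∨ (36 + 3 * j ≤ i ∧ i < 39 + 3 * j) ∨
              (45 + 3 * j ≤ i ∧ i < 48 + 3 * j) then j + 4
      else if (54 + 3 * j ≤ i ∧ i < 57 + 3 * j) ∨ (63 + 3 * j ≤ i ∧ i < 66 + 3 * j) ∨
              (72 + 3 * j ≤ i ∧ i < 75 + 3 * j) then j + 7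
      else grid) 0
  grid_positions ++ get_locations_in_grid grid

-- ===== PORT B =====
def get_grid_positions_alt (vals : List Int) (i : Int) : List Int :=
  if ¬ (0 ≤ i ∧ i < 81) then []
  else
    let base : Int :=
      (PySem.Int.floordiv (PySem.Int.floordiv i 9) 3) * 27 +
      (PySem.Int.floordiv (PySem.Int.mod i 9) 3) * 3
    (PySem.List.pyRange 0 3 1).flatMap (fun r =>
      (PySem.List.pyRange 0 3 1).map (fun c => base + r * 9 + c))

-- ===== PRECONDITION & SPEC =====
def Spec_get_grid_positions (vals : List Int) (i : Int) (out : List Int) : Prop := out = get_grid_positions_alt vals i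
instance (vals : List Int) (i : Int) (out : List Int) : Decidable (Spec_get_grid_positions vals i out) := by unfold Spec_get_grid_positions; infer_instance

-- ===== CLAIM (what is proved, stated in full; the proofs are below) =====
def Claim_equal_get_grid_positions : Prop := ∀ (vals : List Int) (i : Int), Dom_get_grid_positions vals i → Spec_get_grid_positions vals i (get_grid_positions vals i)

-- ===== LEMMAS AND PROOFS =====

-- both ports ignore `vals`, definitionally
lemma ggp_vals_irrel (vals : List Int) (i : Int) :
    get_grid_positions vals i = get_grid_positions [] i := rfl

lemma ggp_alt_vals_irrel (vals : List Int) (i : Int) :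
    get_grid_positions_alt vals i = get_grid_positions_alt [] i := rfl

lemma ggp_pyRange03 : PySem.List.pyRange (0 : Int) 3 1 = [0, 1, 2] := by decide

lemma ggp_out_of_range (vals : List Int) (i : Int) (h : ¬ (0 ≤ i ∧ i < 81)) :
    get_grid_positions vals i = get_grid_positions_alt vals i := by
  unfold get_grid_positions get_grid_positions_alt
  rw [if_pos h, ggp_pyRange03]
  simp only [List.foldl]
  split_ifs <;> first | omega | (simp [get_locations_in_grid])

-- ===== VERDICT (by name: the statement is the Claim_ definition above) =====
theorem get_grid_positions_spec : Claim_equal_get_grid_positions := by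
  intro vals i _
  unfold Spec_get_grid_positions
  by_cases h : 0 ≤ i ∧ i < 81
  · obtain ⟨h1, h2⟩ := h
    rw [ggp_vals_irrel, ggp_alt_vals_irrel]
    interval_cases i <;> decide
  · exact ggp_out_of_range vals i h
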